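-- pv_equiv track=rewrite | github.com/posl/comment_recommendation | script/mod_gen/5_time/zh/129_B/8.py | search_min_diff
-- ===== SOURCE A (Python) =====
-- def search_min_diff(n, w):
--     min_diff = 100 * 100
--     for i in range(1, n):
--         s1 = sum(w[:i])
--         s2 = sum(w[i:])
--         diff = abs(s1 - s2)
--         if min_diff > diff:
--             min_diff = diff
--     return min_diff
-- ===== SOURCE B (Python) =====
-- def search_min_diff(n, w):
--     total = sum(w)
--     best = 100 * 100
--     prefix = 0
--     for i in range(1, n):
--         prefix += w[i - 1]
--         diff = abs(2 * prefix - total)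
--         if diff < best:
--             best = diff
--     return best
-- ===== Notes on version B (the rewrite author's own statement) =====
-- stated objective: faster
-- what changed: B sums the list once and maintains the prefix sum incrementally, so each split costs O(1) instead of re-summing both slices; Pre_ excludes n > len(w)+1, where A's slices silently clamp but B's direct indexing raises IndexError.
-- outside the precondition, e.g. on search_min_diff(3, [1]): A returns 1, B raises IndexError
import Mathlib
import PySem

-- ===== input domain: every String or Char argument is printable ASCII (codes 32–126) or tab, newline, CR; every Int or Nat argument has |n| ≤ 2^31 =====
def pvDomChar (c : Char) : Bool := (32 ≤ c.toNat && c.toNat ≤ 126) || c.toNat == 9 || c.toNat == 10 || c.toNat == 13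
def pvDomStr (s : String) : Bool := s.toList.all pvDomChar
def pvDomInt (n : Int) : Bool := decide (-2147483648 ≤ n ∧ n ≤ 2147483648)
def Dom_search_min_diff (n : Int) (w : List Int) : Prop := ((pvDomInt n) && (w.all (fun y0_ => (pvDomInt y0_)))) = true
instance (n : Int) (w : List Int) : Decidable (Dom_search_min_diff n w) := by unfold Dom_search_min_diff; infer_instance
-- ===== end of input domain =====

-- B is a one-pass rewrite (faster): the total is summed once and the prefix sum
-- is maintained incrementally, so each split costs O(1) instead of re-summing.

-- ===== PORT A =====
def search_min_diff (n : Int) (w : List Int) : Int :=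
  (PySem.List.pyRange 1 n 1).foldl (fun min_diff i =>
    let s1 := (PySem.List.slice w none (some i)).sum
    let s2 := (PySem.List.slice w (some i) none).sum
    let diff := |s1 - s2|
    if min_diff > diff then diff else min_diff) (100 * 100)

-- ===== PORT B =====
def search_min_diff_alt (n : Int) (w : List Int) : Int :=
  let total := w.sum
  ((PySem.List.pyRange 1 n 1).foldl (fun (st : Int × Int) i =>
    -- w[i-1]: pyGetD is exact here; under Pre_ every index i-1 is in range
    let pre := st.2 + PySem.List.pyGetD w (i - 1) 0
    let diff := |2 * pre - total|
    (if diff < st.1 then diff else st.1, pre)) (100 * 100, 0)).1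

-- ===== PRECONDITION & SPEC =====
-- Pre_ excludes n > len(w)+1: there A's slices silently clamp (every extra split
-- repeats diff = |sum(w)|) while B's direct indexing w[i-1] raises IndexError.
def Pre_search_min_diff (n : Int) (w : List Int) : Prop := n ≤ (w.length : Int) + 1
instance (n : Int) (w : List Int) : Decidable (Pre_search_min_diff n w) := by unfold Pre_search_min_diff; infer_instance
def pvWitness_search_min_diff : Int × List Int := (4, [3, -1, 2, 5])

def Spec_search_min_diff (n : Int) (w : List Int) (out : Int) : Prop := out = search_min_diff_alt n w
instance (n : Int) (w : List Int) (out : Int) : Decidable (Spec_search_min_diff n w out) := by unfold Spec_search_min_diff; infer_instance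

-- ===== CLAIM (what is proved, stated in full; the proofs are below) =====
def Claim_equal_search_min_diff : Prop := ∀ (n : Int) (w : List Int), Dom_search_min_diff n w → Pre_search_min_diff n w → Spec_search_min_diff n w (search_min_diff n w)

-- ===== LEMMAS AND PROOFS =====

-- Joint loop invariant: for m ≤ len w, after processing i = 1..m, B's state is
-- (A's accumulator, sum of the first m elements).
theorem smd_loop (w : List Int) (m : Nat) (hm : m ≤ w.length) : ∀ (md : Int),
    (PySem.List.pyRange 1 (1 + (m : Int)) 1).foldl (fun (st : Int × Int) i =>
      let pre := st.2 + PySem.List.pyGetD w (i - 1) 0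
      let diff := |2 * pre - w.sum|
      (if diff < st.1 then diff else st.1, pre)) (md, 0)
    =
    ((PySem.List.pyRange 1 (1 + (m : Int)) 1).foldl (fun min_diff i =>
      let s1 := (PySem.List.slice w none (some i)).sum
      let s2 := (PySem.List.slice w (some i) none).sum
      let diff := |s1 - s2|
      if min_diff > diff then diff else min_diff) md,
     (w.take m).sum) := by
  induction m with
  | zero =>
      intro md
      have h0 : PySem.List.pyRange 1 (1 + ((0 : Nat) : Int)) 1 = [] := by
        exact PySem.List.pyRange_one_eq_nil (by norm_num)
      rw [h0]
      simp
  | succ m ih =>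
      intro md
      have hsplit : PySem.List.pyRange 1 (1 + ((m + 1 : Nat) : Int)) 1
          = PySem.List.pyRange 1 (1 + (m : Int)) 1 ++ [1 + (m : Int)] := by
        have := PySem.List.pyRange_one_succ_right (a := 1) (b := 1 + (m : Int)) (by omega)
        push_cast
        simpa [add_assoc] using this
      rw [hsplit, List.foldl_append, List.foldl_append, ih (by omega) md]
      simp only [List.foldl_cons, List.foldl_nil]
      have hcast : (1 : Int) + (m : Int) = ((m + 1 : Nat) : Int) := by push_cast; ring
      have hslice1 : PySem.List.slice w none (some ((1 : Int) + (m : Int))) = w.take (m + 1) := by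
        rw [hcast, PySem.List.slice_to_natCast]
      have hslice2 : PySem.List.slice w (some ((1 : Int) + (m : Int))) none = w.drop (m + 1) := by
        rw [hcast, PySem.List.slice_from_natCast]
      have hlt : m < w.length := by omega
      have hidx : (1 : Int) + (m : Int) - 1 = ((m : Nat) : Int) := by ring
      have hget : PySem.List.pyGetD w ((1 : Int) + (m : Int) - 1) 0 = w[m] := by
        rw [hidx, PySem.List.pyGetD_natCast, List.getD_eq_getElem w 0 hlt]
      have hpre : (w.take m).sum + w[m] = (w.take (m + 1)).sum :=
        (List.sum_take_succ w m hlt).symm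
      have hsum : (w.take (m + 1)).sum + (w.drop (m + 1)).sum = w.sum := by
        conv_rhs => rw [← List.take_append_drop (m + 1) w]
        rw [List.sum_append]
      have habs : |2 * (w.take (m + 1)).sum - w.sum|
          = |(w.take (m + 1)).sum - (w.drop (m + 1)).sum| := by
        have h2 : 2 * (w.take (m + 1)).sum - w.sum
            = (w.take (m + 1)).sum - (w.drop (m + 1)).sum := by omega
        rw [h2]
      simp only [hget, hpre, habs, hslice1, hslice2]

-- ===== VERDICT (by name: the statement is the Claim_ definition above) =====
theorem search_min_diff_spec : Claim_equal_search_min_diff := by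
  intro n w _ hpre
  unfold Spec_search_min_diff search_min_diff search_min_diff_alt
  by_cases hn : n ≤ 1
  · rw [PySem.List.pyRange_one_eq_nil hn]; rfl
  · have hm : n = 1 + ((n - 1).toNat : Int) := by omega
    have hlen : (n - 1).toNat ≤ w.length := by
      unfold Pre_search_min_diff at hpre; omega
    rw [hm]
    exact (congrArg Prod.fst (smd_loop w (n - 1).toNat hlen (100 * 100))).symm
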